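-- pv_equiv track=rewrite | github.com/anthonywritescode/aoc2020 | day11/part2.py | compute
-- ===== SOURCE A (Python) =====
-- import collections
-- from typing import Counter
-- from typing import Optional
-- from typing import Tuple
--
-- def _index(lines: Tuple[str, ...], y: int, x: int) -> str:
--     if y < 0:
--         return ' '
--     elif y >= len(lines):
--         return ' '
--     elif x < 0:
--         return ' '
--     elif x >= len(lines[0]):
--         return ' '
--     return lines[y][x]
--
-- def compute(s: str) -> int:
--     lines = tuple(s.splitlines())
--
--     prev: Optional[Tuple[str, ...]] = None
--     while lines != prev:
--         prev = lines
--
--         dct: Counter[Tuple[int, int]] = collections.Counter()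
--         for y, line in enumerate(lines):
--             for x, c in enumerate(line):
--                 if c == '#':
--                     for d_y, d_x in (
--                             (0, 1),
--                             (0, -1),
--                             (1, 0),
--                             (-1, 0),
--                             (1, 1),
--                             (-1, -1),
--                             (1, -1),
--                             (-1, 1),
--                     ):
--                         y_i, x_i = y + d_y, x + d_x
--                         c = _index(lines, y_i, x_i)
--                         while c not in 'L# ':
--                             y_i, x_i = y_i + d_y, x_i + d_x
--                             c = _index(lines, y_i, x_i)
--                         if c != ' ':
--                             dct[(y_i, x_i)] += 1
--
--         new_lines = []
--         for y, line in enumerate(lines):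
--             line_c = []
--             for x, c in enumerate(line):
--                 if c == 'L':
--                     if dct[(y, x)] == 0:
--                         line_c.append('#')
--                     else:
--                         line_c.append('L')
--                 elif c == '#':
--                     if dct[(y, x)] >= 5:
--                         line_c.append('L')
--                     else:
--                         line_c.append('#')
--                 else:
--                     line_c.append(c)
--
--             new_lines.append(''.join(line_c))
--
--         lines = tuple(new_lines)
--
--     return sum(line.count('#') for line in lines)
-- ===== SOURCE B (Python) =====
-- def compute(s: str) -> int:
--     lines = s.splitlines()
--     h = len(lines)
--     w = len(lines[0]) if lines else 0
--
--     def at(y, x):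
--         if 0 <= y < h and 0 <= x < w:
--             return lines[y][x]
--         return ' '
--
--     dirs = ((0, 1), (0, -1), (1, 0), (-1, 0), (1, 1), (-1, -1), (1, -1), (-1, 1))
--     # precompute once: for every seat, the first seat visible in each direction
--     # (rays never change between iterations: seats stay seats, floor stays floor)
--     targets = []
--     for y in range(h):
--         for x in range(w):
--             if at(y, x) in 'L#':
--                 ts = []
--                 for dy, dx in dirs:
--                     yi, xi = y + dy, x + dx
--                     while at(yi, xi) not in 'L# ':
--                         yi, xi = yi + dy, xi + dx
--                     if at(yi, xi) != ' ':
--                         ts.append((yi, xi))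
--                 targets.append(((y, x), ts))
--
--     grid = [list(line) for line in lines]
--     changed = True
--     while changed:
--         counts = {}
--         for (y, x), ts in targets:
--             if grid[y][x] == '#':
--                 for t in ts:
--                     counts[t] = counts.get(t, 0) + 1
--         changed = False
--         new = []
--         for y, row in enumerate(grid):
--             r2 = []
--             for x, c in enumerate(row):
--                 if c == 'L' and counts.get((y, x), 0) == 0:
--                     r2.append('#')
--                     changed = True
--                 elif c == '#' and counts.get((y, x), 0) >= 5:
--                     r2.append('L')
--                     changed = True
--                 else:
--                     r2.append(c)
--             new.append(r2)
--         grid = new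
--     return sum(row.count('#') for row in grid)
-- ===== Notes on version B (the rewrite author's own statement) =====
-- stated objective: alternative
-- what changed: B precomputes each seat's static line-of-sight neighbour list once (rays cannot change between iterations since seats stay seats and floor stays floor) and then, per iteration, only counts occupied precomputed neighbours, where A re-walks every ray across the grid in every iteration; per-iteration work drops from O(cells*raylen) to O(cells), paid for by a one-off precomputation.
-- outside the precondition, e.g. on compute('L\nL#'): A returns 1, B returns 3; on compute('##\n#'): A raises IndexError, B raises IndexError
import Mathlib
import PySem

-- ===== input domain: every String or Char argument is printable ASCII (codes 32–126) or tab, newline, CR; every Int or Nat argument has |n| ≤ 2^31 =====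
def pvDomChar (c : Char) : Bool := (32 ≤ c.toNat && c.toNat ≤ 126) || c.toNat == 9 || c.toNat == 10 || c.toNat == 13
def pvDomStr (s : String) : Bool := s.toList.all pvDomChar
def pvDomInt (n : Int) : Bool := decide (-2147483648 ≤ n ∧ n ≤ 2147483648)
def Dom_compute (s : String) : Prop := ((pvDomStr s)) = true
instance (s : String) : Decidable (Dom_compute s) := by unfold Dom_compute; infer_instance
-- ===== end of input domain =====

-- B precomputes the static line-of-sight neighbour lists once and only counts per
-- iteration (A re-walks every ray across the grid in every iteration).

-- ===== PORT A =====
-- shared low-level helpers: grid = splitlines rows as char lists.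
-- pvCell g y x is Python's lines[y][x]; its `.getD ' '` arm is Python's
-- IndexError, unreachable under Pre_compute (rectangular grid, 0 ≤ y < h, 0 ≤ x < w).
def pvCell (g : List (List Char)) (y x : Int) : Char :=
  (PySem.List.pyGet? ((PySem.List.pyGet? g y).getD []) x).getD ' '

-- len(lines[0]) if lines else 0
def pvW (g : List (List Char)) : Int := (((PySem.List.pyGet? g 0).getD []).length : Int)

def pvDirs : List (Int × Int) :=
  [(0,1), (0,-1), (1,0), (-1,0), (1,1), (-1,-1), (1,-1), (-1,1)]

-- fuel for the ray `while` loop: a ray leaves the h×w board after at most h+w+1 steps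
def pvRayFuel (g : List (List Char)) : Nat :=
  g.length + (((PySem.List.pyGet? g 0).getD []).length) + 2

-- fuel for the outer `while lines != prev` loop (totalisation device only; the
-- Python loop is unbounded and on the tested inputs the fixpoint is reached
-- well inside this bound — both ports carry the same fuel)
def pvLoopFuel (g : List (List Char)) : Nat :=
  (g.length + g.flatten.length + 2) * (g.length + g.flatten.length + 2)

-- _index(lines, y, x)
def idxA (g : List (List Char)) (y x : Int) : Char :=
  if y < 0 then ' '
  else if (g.length : Int) ≤ y then ' '
  else if x < 0 then ' '
  else if pvW g ≤ x then ' '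
  else pvCell g y x

-- the inner `while c not in 'L# '` ray walk
def walkA (g : List (List Char)) (dy dx : Int) : Nat → Int → Int → Int × Int
  | 0, y, x => (y, x)
  | f+1, y, x =>
    let c := idxA g y x
    if c = 'L' ∨ c = '#' ∨ c = ' ' then (y, x)
    else walkA g dy dx f (y + dy) (x + dx)

-- the `for d_y, d_x in (...)` body for one occupied seat (Counter increments)
def castA (g : List (List Char)) (y x : Int) (d : PySem.Dict (Int × Int) Int) :
    PySem.Dict (Int × Int) Int :=
  pvDirs.foldl (fun d p =>
    let q := walkA g p.1 p.2 (pvRayFuel g) (y + p.1) (x + p.2)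
    if idxA g q.1 q.2 ≠ ' ' then PySem.Dict.modify d q 0 (· + 1) else d) d

-- dct = Counter(); for y, line in enumerate(lines): for x, c in enumerate(line): ...
def buildA (g : List (List Char)) : PySem.Dict (Int × Int) Int :=
  (PySem.List.enumerate g).foldl (fun d yr =>
    (PySem.List.enumerate yr.2).foldl (fun d xc =>
      if xc.2 = '#' then castA g yr.1 xc.1 d else d) d) PySem.Dict.empty

-- the new_lines construction
def nextA (g : List (List Char)) : List (List Char) :=
  let dct := buildA g
  (PySem.List.enumerate g).map (fun yr =>
    (PySem.List.enumerate yr.2).map (fun xc =>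
      if xc.2 = 'L' then (if dct.getD (yr.1, xc.1) 0 = 0 then '#' else 'L')
      else if xc.2 = '#' then (if 5 ≤ dct.getD (yr.1, xc.1) 0 then 'L' else '#')
      else xc.2))

-- while lines != prev: prev = lines; lines = <one step>
def loopA : Nat → List (List Char) → List (List Char)
  | 0, g => g
  | f+1, g => let n := nextA g; if n = g then g else loopA f n

def compute (s : String) : Int :=
  let g := (PySem.Str.splitlines s).map String.toList
  let fin := loopA (pvLoopFuel g) g
  (fin.map (fun row => ((row.count '#' : Nat) : Int))).sum

-- ===== PORT B =====
-- at(y, x) of Source B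
def atB (g : List (List Char)) (h w : Int) (y x : Int) : Char :=
  if 0 ≤ y ∧ y < h ∧ 0 ≤ x ∧ x < w then pvCell g y x else ' '

-- the precomputation ray walk of Source B
def walkB (g : List (List Char)) (h w : Int) (dy dx : Int) : Nat → Int → Int → Int × Int
  | 0, y, x => (y, x)
  | f+1, y, x =>
    let c := atB g h w y x
    if c = 'L' ∨ c = '#' ∨ c = ' ' then (y, x)
    else walkB g h w dy dx f (y + dy) (x + dx)

-- ts for one seat
def raysB (g : List (List Char)) (h w : Int) (y x : Int) : List (Int × Int) :=
  pvDirs.foldl (fun ts p =>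
    let q := walkB g h w p.1 p.2 (pvRayFuel g) (y + p.1) (x + p.2)
    if atB g h w q.1 q.2 ≠ ' ' then ts ++ [q] else ts) []

-- targets: [((y, x), ts) for every seat cell], built once
def targetsB (g : List (List Char)) (h w : Int) : List ((Int × Int) × List (Int × Int)) :=
  (PySem.List.pyRange 0 h 1).foldl (fun acc y =>
    (PySem.List.pyRange 0 w 1).foldl (fun acc x =>
      if atB g h w y x = 'L' ∨ atB g h w y x = '#' then acc ++ [((y, x), raysB g h w y x)]
      else acc) acc) []

-- counts = {}; for (y, x), ts in targets: if grid[y][x] == '#': for t in ts: counts[t] += 1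
def countsB (ts : List ((Int × Int) × List (Int × Int))) (g : List (List Char)) :
    PySem.Dict (Int × Int) Int :=
  ts.foldl (fun d pr =>
    if pvCell g pr.1.1 pr.1.2 = '#' then
      pr.2.foldl (fun d t => PySem.Dict.insert d t (d.getD t 0 + 1)) d
    else d) PySem.Dict.empty

-- one body of the while loop: (new grid, changed)
def stepB (ts : List ((Int × Int) × List (Int × Int))) (g : List (List Char)) :
    List (List Char) × Bool :=
  let counts := countsB ts g
  (PySem.List.enumerate g).foldl (fun st yr =>
    let r2 := (PySem.List.enumerate yr.2).foldl (fun st2 xc =>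
      if xc.2 = 'L' ∧ counts.getD (yr.1, xc.1) 0 = 0 then (st2.1 ++ ['#'], true)
      else if xc.2 = '#' ∧ 5 ≤ counts.getD (yr.1, xc.1) 0 then (st2.1 ++ ['L'], true)
      else (st2.1 ++ [xc.2], st2.2)) (([] : List Char), st.2)
    (st.1 ++ [r2.1], r2.2)) (([] : List (List Char)), false)

-- while changed:
def loopB (ts : List ((Int × Int) × List (Int × Int))) :
    Nat → List (List Char) → List (List Char)
  | 0, g => g
  | f+1, g => let r := stepB ts g; if r.2 then loopB ts f r.1 else r.1

def compute_alt (s : String) : Int :=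
  let lines := (PySem.Str.splitlines s).map String.toList
  let ts := targetsB lines (lines.length : Int) (pvW lines)
  let fin := loopB ts (pvLoopFuel lines) lines
  (fin.map (fun row => ((row.count '#' : Nat) : Int))).sum

-- ===== PRECONDITION & SPEC =====
-- Pre_: the grid must be rectangular (every line as long as the first). This is the
-- task's natural domain: on ragged input A raises IndexError as soon as a ray steps
-- into a row shorter than the first, and where it happens to return, treating
-- len(lines[0]) as every row's width is an artefact of A's implementation.
def Pre_compute (s : String) : Prop :=
  ∀ line ∈ PySem.Str.splitlines s,
    PySem.Str.len line = PySem.Str.len ((PySem.Str.splitlines s).headI)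
instance (s : String) : Decidable (Pre_compute s) := by unfold Pre_compute; infer_instance

def pvWitness_compute : String := "#L\n.L"

def Spec_compute (s : String) (out : Int) : Prop := out = compute_alt s
instance (s : String) (out : Int) : Decidable (Spec_compute s out) := by
  unfold Spec_compute; infer_instance

-- ===== CLAIM (what is proved, stated in full; the proofs are below) =====
def Claim_equal_compute : Prop :=
  ∀ (s : String), Dom_compute s → Pre_compute s → Spec_compute s (compute s)

-- ===== LEMMAS AND PROOFS =====

-- character class: seats ('L'/'#') are identified, every other char is itself
def clsC (c : Char) : Option Char := if c = 'L' ∨ c = '#' then none else some c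

-- grids with the same seat/floor layout (the step only toggles L ↔ #)
def ClsEq (g g0 : List (List Char)) : Prop :=
  g.map (List.map clsC) = g0.map (List.map clsC)

def RectG (g : List (List Char)) : Prop := ∀ row ∈ g, (row.length : Int) = pvW g

theorem clsC_cases {c c' : Char} (h : clsC c = clsC c') :
    ((c = 'L' ∨ c = '#') ∧ (c' = 'L' ∨ c' = '#')) ∨ c = c' := by
  unfold clsC at h; split_ifs at h <;> simp_all

theorem clsEq_length {g g0 : List (List Char)} (h : ClsEq g g0) : g.length = g0.length := by
  have := congrArg List.length h; simpa using this

theorem clsEq_row {g g0 : List (List Char)} (h : ClsEq g g0) (k : Nat)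
    (hk : k < g.length) (hk0 : k < g0.length) :
    g[k].map clsC = g0[k].map clsC := by
  have := congrArg (fun l => l[k]?) h
  simp only [List.getElem?_map] at this
  rw [List.getElem?_eq_getElem hk, List.getElem?_eq_getElem hk0] at this
  simpa using this

theorem clsEq_rowlen {g g0 : List (List Char)} (h : ClsEq g g0) (k : Nat)
    (hk : k < g.length) (hk0 : k < g0.length) : g[k].length = g0[k].length := by
  have := congrArg List.length (clsEq_row h k hk hk0); simpa using this

theorem clsEq_w {g g0 : List (List Char)} (h : ClsEq g g0) : pvW g = pvW g0 := by
  have hl := clsEq_length h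
  cases g with
  | nil => cases g0 with
    | nil => rfl
    | cons r0 t0 => simp at hl
  | cons r t =>
    cases g0 with
    | nil => simp at hl
    | cons r0 t0 =>
      have := clsEq_rowlen h 0 (by simp) (by simp)
      simp only [pvW, PySem.List.pyGet?_zero_cons, Option.getD_some]
      simpa using this

theorem rayFuel_eq {g g0 : List (List Char)} (h : ClsEq g g0) : pvRayFuel g = pvRayFuel g0 := by
  have h1 := clsEq_length h
  have h2 := clsEq_w h
  simp only [pvW, Nat.cast_inj] at h2
  simp [pvRayFuel, h1, h2]

theorem clsEq_cell {g g0 : List (List Char)} (h : ClsEq g g0)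
    (y x : Int) (hy : 0 ≤ y) (hy2 : y < (g0.length : Int))
    (hx : 0 ≤ x) : clsC (pvCell g y x) = clsC (pvCell g0 y x) := by
  have hl := clsEq_length h
  have hy2' : y.toNat < g0.length := by omega
  have hy2'' : y.toNat < g.length := by omega
  have hrow := clsEq_row h y.toNat hy2'' hy2'
  unfold pvCell
  rw [PySem.List.pyGet?_of_nonneg g hy, PySem.List.pyGet?_of_nonneg g0 hy,
    List.getElem?_eq_getElem hy2'', List.getElem?_eq_getElem hy2']
  simp only [Option.getD_some]
  rw [PySem.List.pyGet?_of_nonneg _ hx, PySem.List.pyGet?_of_nonneg _ hx]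
  have hmap := congrArg (fun l => l[x.toNat]?) hrow
  simp only [List.getElem?_map] at hmap
  cases h1 : g[y.toNat][x.toNat]? with
  | none =>
    cases h2 : g0[y.toNat][x.toNat]? with
    | none => rfl
    | some c => rw [h1, h2] at hmap; simp at hmap
  | some c =>
    cases h2 : g0[y.toNat][x.toNat]? with
    | none => rw [h1, h2] at hmap; simp at hmap
    | some c' =>
      rw [h1, h2] at hmap
      simp only [Option.map_some, Option.some.injEq] at hmap
      simpa using hmap

theorem idx_at_cls {g g0 : List (List Char)} (h : ClsEq g g0) (y x : Int) :
    clsC (idxA g y x) = clsC (atB g0 (g0.length : Int) (pvW g0) y x) := by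
  have hl := clsEq_length h
  have hw := clsEq_w h
  by_cases hb : 0 ≤ y ∧ y < (g0.length : Int) ∧ 0 ≤ x ∧ x < pvW g0
  · obtain ⟨hb1, hb2, hb3, hb4⟩ := hb
    rw [atB, if_pos ⟨hb1, hb2, hb3, hb4⟩]
    have e1 : ¬ y < 0 := by omega
    have e2 : ¬ (g.length : Int) ≤ y := by omega
    have e3 : ¬ x < 0 := by omega
    have e4 : ¬ pvW g ≤ x := by omega
    rw [idxA, if_neg e1, if_neg e2, if_neg e3, if_neg e4]
    exact clsEq_cell h y x hb1 hb2 hb3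
  · rw [atB, if_neg hb]
    unfold idxA
    split_ifs with h1 h2 h3 h4
    · rfl
    · rfl
    · rfl
    · rfl
    · exfalso; rw [hw] at h4; omega

theorem stop_iff_of_cls {c c' : Char} (h : clsC c = clsC c') :
    (c = 'L' ∨ c = '#' ∨ c = ' ') ↔ (c' = 'L' ∨ c' = '#' ∨ c' = ' ') := by
  rcases clsC_cases h with ⟨h1, h2⟩ | rfl
  · constructor <;> intro _
    · exact h2.elim (fun e => Or.inl e) (fun e => Or.inr (Or.inl e))
    · exact h1.elim (fun e => Or.inl e) (fun e => Or.inr (Or.inl e))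
  · exact Iff.rfl
theorem space_iff_of_cls {c c' : Char} (h : clsC c = clsC c') : c = ' ' ↔ c' = ' ' := by
  rcases clsC_cases h with ⟨h1, h2⟩ | rfl
  · constructor <;> intro hc
    · rcases h1 with rfl | rfl <;> exact absurd hc (by decide)
    · rcases h2 with rfl | rfl <;> exact absurd hc (by decide)
  · exact Iff.rfl

theorem walk_eq {g g0 : List (List Char)} (h : ClsEq g g0) (dy dx : Int) :
    ∀ (f : Nat) (y x : Int),
      walkA g dy dx f y x = walkB g0 (g0.length : Int) (pvW g0) dy dx f y x := by
  intro f
  induction f with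
  | zero => intro y x; rfl
  | succ f ih =>
    intro y x
    have hcls := idx_at_cls h y x
    by_cases hs : idxA g y x = 'L' ∨ idxA g y x = '#' ∨ idxA g y x = ' '
    · rw [walkA, walkB]
      simp only [if_pos hs, if_pos ((stop_iff_of_cls hcls).mp hs)]
    · rw [walkA, walkB]
      simp only [if_neg hs, if_neg (fun hc => hs ((stop_iff_of_cls hcls).mpr hc))]
      exact ih (y + dy) (x + dx)

theorem cast_eq_rays {g g0 : List (List Char)} (h : ClsEq g g0) (y x : Int)
    (d : PySem.Dict (Int × Int) Int) :
    castA g y x d =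
      (raysB g0 (g0.length : Int) (pvW g0) y x).foldl
        (fun d t => PySem.Dict.insert d t (d.getD t 0 + 1)) d := by
  have hf := rayFuel_eq h
  have hwk : ∀ p : Int × Int,
      walkA g p.1 p.2 (pvRayFuel g) (y + p.1) (x + p.2) =
      walkB g0 (g0.length : Int) (pvW g0) p.1 p.2 (pvRayFuel g0) (y + p.1) (x + p.2) := by
    intro p; rw [hf]; exact walk_eq h p.1 p.2 _ _ _
  show pvDirs.foldl (fun d p =>
      if idxA g (walkA g p.1 p.2 (pvRayFuel g) (y + p.1) (x + p.2)).1
          (walkA g p.1 p.2 (pvRayFuel g) (y + p.1) (x + p.2)).2 ≠ ' ' then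
        PySem.Dict.modify d (walkA g p.1 p.2 (pvRayFuel g) (y + p.1) (x + p.2)) 0 (· + 1)
      else d) d =
    (pvDirs.foldl (fun ts p =>
      if atB g0 (g0.length : Int) (pvW g0)
          (walkB g0 (g0.length : Int) (pvW g0) p.1 p.2 (pvRayFuel g0) (y + p.1) (x + p.2)).1
          (walkB g0 (g0.length : Int) (pvW g0) p.1 p.2 (pvRayFuel g0) (y + p.1) (x + p.2)).2 ≠ ' ' then
        ts ++ [walkB g0 (g0.length : Int) (pvW g0) p.1 p.2 (pvRayFuel g0) (y + p.1) (x + p.2)]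
      else ts) []).foldl (fun d t => PySem.Dict.insert d t (d.getD t 0 + 1)) d
  rw [PySem.List.foldl_congr_mem pvDirs _
    (fun d p =>
      if atB g0 (g0.length : Int) (pvW g0)
          (walkB g0 (g0.length : Int) (pvW g0) p.1 p.2 (pvRayFuel g0) (y + p.1) (x + p.2)).1
          (walkB g0 (g0.length : Int) (pvW g0) p.1 p.2 (pvRayFuel g0) (y + p.1) (x + p.2)).2 ≠ ' ' then
        PySem.Dict.insert d (walkB g0 (g0.length : Int) (pvW g0) p.1 p.2 (pvRayFuel g0) (y + p.1) (x + p.2))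
          (d.getD (walkB g0 (g0.length : Int) (pvW g0) p.1 p.2 (pvRayFuel g0) (y + p.1) (x + p.2)) 0 + 1)
      else d) d ?_]
  · rw [PySem.List.foldl_ite_eq_foldl_filter
        (p := fun p : Int × Int => atB g0 (g0.length : Int) (pvW g0)
          (walkB g0 (g0.length : Int) (pvW g0) p.1 p.2 (pvRayFuel g0) (y + p.1) (x + p.2)).1
          (walkB g0 (g0.length : Int) (pvW g0) p.1 p.2 (pvRayFuel g0) (y + p.1) (x + p.2)).2 ≠ ' ')
        (f := fun d p => PySem.Dict.insert d
          (walkB g0 (g0.length : Int) (pvW g0) p.1 p.2 (pvRayFuel g0) (y + p.1) (x + p.2))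
          (d.getD (walkB g0 (g0.length : Int) (pvW g0) p.1 p.2 (pvRayFuel g0) (y + p.1) (x + p.2)) 0 + 1))]
    rw [PySem.List.foldl_append_ite
        (p := fun p : Int × Int => atB g0 (g0.length : Int) (pvW g0)
          (walkB g0 (g0.length : Int) (pvW g0) p.1 p.2 (pvRayFuel g0) (y + p.1) (x + p.2)).1
          (walkB g0 (g0.length : Int) (pvW g0) p.1 p.2 (pvRayFuel g0) (y + p.1) (x + p.2)).2 ≠ ' ')
        (f := fun p => walkB g0 (g0.length : Int) (pvW g0) p.1 p.2 (pvRayFuel g0) (y + p.1) (x + p.2))]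
    rw [List.nil_append, List.foldl_map]
  · intro d' p _
    beta_reduce
    rw [hwk p]
    have hcls := idx_at_cls h
      (walkB g0 (g0.length : Int) (pvW g0) p.1 p.2 (pvRayFuel g0) (y + p.1) (x + p.2)).1
      (walkB g0 (g0.length : Int) (pvW g0) p.1 p.2 (pvRayFuel g0) (y + p.1) (x + p.2)).2
    have hiff := space_iff_of_cls hcls
    by_cases hsp : atB g0 (g0.length : Int) (pvW g0)
        (walkB g0 (g0.length : Int) (pvW g0) p.1 p.2 (pvRayFuel g0) (y + p.1) (x + p.2)).1
        (walkB g0 (g0.length : Int) (pvW g0) p.1 p.2 (pvRayFuel g0) (y + p.1) (x + p.2)).2 = ' '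
    · rw [if_neg (not_not_intro (hiff.mpr hsp)), if_neg (not_not_intro hsp)]
    · rw [if_pos (fun hc => hsp (hiff.mp hc)), if_pos hsp]
      rfl

theorem targetsB_flat (g0 : List (List Char)) (hh ww : Int) :
    targetsB g0 hh ww = (PySem.List.pyRange 0 hh 1).flatMap (fun y =>
      ((PySem.List.pyRange 0 ww 1).filter
        (fun x => decide (atB g0 hh ww y x = 'L' ∨ atB g0 hh ww y x = '#'))).map
        (fun x => ((y, x), raysB g0 hh ww y x))) := by
  unfold targetsB
  rw [PySem.List.foldl_congr_mem (PySem.List.pyRange 0 hh 1) _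
    (fun acc y => acc ++ ((PySem.List.pyRange 0 ww 1).filter
        (fun x => decide (atB g0 hh ww y x = 'L' ∨ atB g0 hh ww y x = '#'))).map
        (fun x => ((y, x), raysB g0 hh ww y x))) [] ?_]
  · rw [PySem.List.foldl_append_eq_flatMap, List.nil_append]
  · intro acc y _
    exact PySem.List.foldl_append_ite
      (p := fun x => atB g0 hh ww y x = 'L' ∨ atB g0 hh ww y x = '#')
      (f := fun x => ((y, x), raysB g0 hh ww y x)) _ acc

theorem build_eq_counts {g g0 : List (List Char)} (h : ClsEq g g0) (hrect : RectG g0) :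
    buildA g = countsB (targetsB g0 (g0.length : Int) (pvW g0)) g := by
  have hl := clsEq_length h
  have hw := clsEq_w h
  unfold buildA countsB
  rw [targetsB_flat, List.foldl_flatMap]
  rw [PySem.List.enumerate_eq_map_pyRange g [], List.foldl_map, PySem.List.len_eq,
    show (g.length : Int) = (g0.length : Int) from by rw [hl]]
  apply PySem.List.foldl_congr_mem
  intro d y hy
  rw [PySem.List.mem_pyRange_one] at hy
  beta_reduce
  have hyg : y.toNat < g.length := by omega
  have hyg0 : y.toNat < g0.length := by omega
  have hrow0 : (g0[y.toNat].length : Int) = pvW g0 :=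
    hrect g0[y.toNat] (List.getElem_mem hyg0)
  have hrowlen : PySem.List.len (PySem.List.pyGetD g y []) = pvW g0 := by
    rw [PySem.List.pyGetD_eq_getElem g [] hy.1 (by omega), PySem.List.len_eq,
      show g[y.toNat].length = g0[y.toNat].length from clsEq_rowlen h y.toNat hyg hyg0]
    exact hrow0
  rw [PySem.List.enumerate_eq_map_pyRange (PySem.List.pyGetD g y []) ' ', List.foldl_map,
    hrowlen]
  rw [List.foldl_map, ← PySem.List.foldl_ite_eq_foldl_filter
    (p := fun x => atB g0 (g0.length : Int) (pvW g0) y x = 'L' ∨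
      atB g0 (g0.length : Int) (pvW g0) y x = '#')
    (f := fun d x => if pvCell g y x = '#' then
      (raysB g0 (g0.length : Int) (pvW g0) y x).foldl
        (fun d t => PySem.Dict.insert d t (d.getD t 0 + 1)) d
      else d)]
  apply PySem.List.foldl_congr_mem
  intro d' x hx
  rw [PySem.List.mem_pyRange_one] at hx
  beta_reduce
  have hcell : PySem.List.pyGetD (PySem.List.pyGetD g y []) x ' ' = pvCell g y x := rfl
  rw [hcell]
  have hidx : idxA g y x = pvCell g y x := by
    have e1 : ¬ y < 0 := by omega
    have e2 : ¬ (g.length : Int) ≤ y := by omega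
    have e3 : ¬ x < 0 := by omega
    have e4 : ¬ pvW g ≤ x := by omega
    rw [idxA, if_neg e1, if_neg e2, if_neg e3, if_neg e4]
  by_cases hc : pvCell g y x = '#'
  · have hseat : atB g0 (g0.length : Int) (pvW g0) y x = 'L' ∨
        atB g0 (g0.length : Int) (pvW g0) y x = '#' := by
      have hcls := idx_at_cls h y x
      rw [hidx, hc] at hcls
      have hcls' : (none : Option Char) =
          clsC (atB g0 (g0.length : Int) (pvW g0) y x) := by
        rw [← hcls]; rfl
      unfold clsC at hcls'
      split_ifs at hcls' with hs
      exact hs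
    rw [if_pos hc, if_pos hseat, if_pos hc]
    exact cast_eq_rays h y x d'
  · rw [if_neg hc]
    by_cases hseat : atB g0 (g0.length : Int) (pvW g0) y x = 'L' ∨
        atB g0 (g0.length : Int) (pvW g0) y x = '#'
    · rw [if_pos hseat, if_neg hc]
    · rw [if_neg hseat]

-- the per-cell update, in B's branch shape
def fB (cnt : PySem.Dict (Int × Int) Int) (y x : Int) (c : Char) : Char :=
  if c = 'L' ∧ cnt.getD (y, x) 0 = 0 then '#'
  else if c = '#' ∧ 5 ≤ cnt.getD (y, x) 0 then 'L'
  else c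

theorem fA_eq_fB (cnt : PySem.Dict (Int × Int) Int) (y x : Int) (c : Char) :
    (if c = 'L' then (if cnt.getD (y, x) 0 = 0 then '#' else 'L')
     else if c = '#' then (if 5 ≤ cnt.getD (y, x) 0 then 'L' else '#')
     else c) = fB cnt y x c := by
  unfold fB
  split_ifs <;> simp_all

theorem nextA_eq_map (g : List (List Char)) :
    nextA g = (PySem.List.enumerate g).map (fun yr =>
      (PySem.List.enumerate yr.2).map (fun xc => fB (buildA g) yr.1 xc.1 xc.2)) := by
  unfold nextA
  simp only [fA_eq_fB]

theorem clsC_fB (cnt : PySem.Dict (Int × Int) Int) (y x : Int) (c : Char) :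
    clsC (fB cnt y x c) = clsC c := by
  unfold fB clsC
  split_ifs <;> simp_all

theorem map_enum_eq_iff {α : Type} (l : List α) (s : Int) (f : Int × α → α) :
    ((PySem.List.enumerate l s).map f = l) ↔
      ∀ e ∈ PySem.List.enumerate l s, f e = e.2 := by
  constructor
  · intro hm e he
    rw [List.mem_iff_getElem] at he
    obtain ⟨k, hk, rfl⟩ := he
    have hk' : k < l.length := by
      have := PySem.List.length_enumerate l s; omega
    have h1 := congrArg (fun t => t[k]?) hm
    simp only [List.getElem?_map] at h1
    rw [List.getElem?_eq_getElem hk, List.getElem?_eq_getElem hk'] at h1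
    simp only [Option.map_some, Option.some.injEq] at h1
    rw [PySem.List.getElem_enumerate l s k hk] at h1 ⊢
    exact h1
  · intro hp
    calc (PySem.List.enumerate l s).map f
        = (PySem.List.enumerate l s).map (fun e => e.2) := List.map_congr_left hp
      _ = l := PySem.List.map_snd_enumerate l s

theorem step_eq {g g0 : List (List Char)} (h : ClsEq g g0) (hrect : RectG g0) :
    stepB (targetsB g0 (g0.length : Int) (pvW g0)) g =
      (nextA g, decide (nextA g ≠ g)) := by
  have hcnt : countsB (targetsB g0 (g0.length : Int) (pvW g0)) g = buildA g :=
    (build_eq_counts h hrect).symm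
  unfold stepB
  rw [hcnt]
  -- inner loop body in two-accumulator form
  have hinner : ∀ (y : Int) (row : List Char) (st : List Char × Bool),
      (PySem.List.enumerate row).foldl (fun st2 xc =>
        if xc.2 = 'L' ∧ (buildA g).getD (y, xc.1) 0 = 0 then (st2.1 ++ ['#'], true)
        else if xc.2 = '#' ∧ 5 ≤ (buildA g).getD (y, xc.1) 0 then (st2.1 ++ ['L'], true)
        else (st2.1 ++ [xc.2], st2.2)) st =
      (st.1 ++ (PySem.List.enumerate row).map (fun xc => fB (buildA g) y xc.1 xc.2),
       st.2 || (PySem.List.enumerate row).any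
         (fun xc => decide (fB (buildA g) y xc.1 xc.2 ≠ xc.2))) := by
    intro y row st
    have hbody : (fun (st2 : List Char × Bool) (xc : Int × Char) =>
        if xc.2 = 'L' ∧ (buildA g).getD (y, xc.1) 0 = 0 then (st2.1 ++ ['#'], true)
        else if xc.2 = '#' ∧ 5 ≤ (buildA g).getD (y, xc.1) 0 then (st2.1 ++ ['L'], true)
        else (st2.1 ++ [xc.2], st2.2)) =
        (fun st2 xc => (st2.1 ++ [fB (buildA g) y xc.1 xc.2],
          if decide (fB (buildA g) y xc.1 xc.2 ≠ xc.2) = true then true else st2.2)) := by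
      funext st2 xc
      unfold fB
      split_ifs with h1 h2 <;> simp_all
    rw [hbody]
    rcases st with ⟨r, b⟩
    rw [PySem.List.foldl_prod_mk
      (f := fun r (xc : Int × Char) => r ++ [fB (buildA g) y xc.1 xc.2])
      (g := fun b (xc : Int × Char) =>
        if decide (fB (buildA g) y xc.1 xc.2 ≠ xc.2) = true then true else b)]
    rw [PySem.List.foldl_append_singleton_eq_map, PySem.List.foldl_if_true_eq]
  -- rewrite each inner fold, then split the outer loop
  rw [PySem.List.foldl_congr_mem (PySem.List.enumerate g) _
    (fun st yr =>
      (st.1 ++ [(PySem.List.enumerate yr.2).map (fun xc => fB (buildA g) yr.1 xc.1 xc.2)],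
       if ((PySem.List.enumerate yr.2).any
         (fun xc => decide (fB (buildA g) yr.1 xc.1 xc.2 ≠ xc.2))) = true then true
       else st.2)) ([], false) ?_]
  · rw [PySem.List.foldl_prod_mk
      (f := fun r (yr : Int × List Char) =>
        r ++ [(PySem.List.enumerate yr.2).map (fun xc => fB (buildA g) yr.1 xc.1 xc.2)])
      (g := fun b (yr : Int × List Char) =>
        if ((PySem.List.enumerate yr.2).any
          (fun xc => decide (fB (buildA g) yr.1 xc.1 xc.2 ≠ xc.2))) = true then true else b)]
    rw [PySem.List.foldl_append_singleton_eq_map, PySem.List.foldl_if_true_eq,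
      List.nil_append, Bool.false_or]
    rw [← nextA_eq_map]
    -- the changed flag is exactly `nextA g ≠ g`
    congr 1
    have hiff : ((PySem.List.enumerate g).any (fun yr => (PySem.List.enumerate yr.2).any
        (fun xc => decide (fB (buildA g) yr.1 xc.1 xc.2 ≠ xc.2))) = false) ↔ nextA g = g := by
      rw [List.any_eq_false, nextA_eq_map, map_enum_eq_iff]
      constructor
      · intro hall yr hyr
        have h2 := hall yr hyr
        rw [Bool.not_eq_true, List.any_eq_false] at h2
        rw [map_enum_eq_iff]
        intro xc hxc
        have := h2 xc hxc
        simpa using this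
      · intro hall yr hyr
        rw [Bool.not_eq_true, List.any_eq_false]
        intro xc hxc
        have h2 := hall yr hyr
        rw [map_enum_eq_iff] at h2
        simp only [decide_eq_true_eq, Decidable.not_not]
        exact h2 xc hxc
    by_cases hn : nextA g = g
    · rw [(by simpa [hn] using hiff.mpr hn : (PySem.List.enumerate g).any (fun yr =>
        (PySem.List.enumerate yr.2).any
          (fun xc => decide (fB (buildA g) yr.1 xc.1 xc.2 ≠ xc.2))) = false)]
      simp [hn]
    · have : ¬ ((PySem.List.enumerate g).any (fun yr => (PySem.List.enumerate yr.2).any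
          (fun xc => decide (fB (buildA g) yr.1 xc.1 xc.2 ≠ xc.2))) = false) :=
        fun hf => hn (hiff.mp hf)
      rw [Bool.not_eq_false] at this
      rw [this]
      simp [hn]
  · intro st yr _
    beta_reduce
    show (st.1 ++ [((PySem.List.enumerate yr.2).foldl (fun st2 xc =>
        if xc.2 = 'L' ∧ (buildA g).getD (yr.1, xc.1) 0 = 0 then (st2.1 ++ ['#'], true)
        else if xc.2 = '#' ∧ 5 ≤ (buildA g).getD (yr.1, xc.1) 0 then (st2.1 ++ ['L'], true)
        else (st2.1 ++ [xc.2], st2.2)) (([] : List Char), st.2)).1],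
      ((PySem.List.enumerate yr.2).foldl (fun st2 xc =>
        if xc.2 = 'L' ∧ (buildA g).getD (yr.1, xc.1) 0 = 0 then (st2.1 ++ ['#'], true)
        else if xc.2 = '#' ∧ 5 ≤ (buildA g).getD (yr.1, xc.1) 0 then (st2.1 ++ ['L'], true)
        else (st2.1 ++ [xc.2], st2.2)) (([] : List Char), st.2)).2) = _
    rw [hinner yr.1 yr.2 ([], st.2)]
    cases hany : (PySem.List.enumerate yr.2).any
        (fun xc => decide (fB (buildA g) yr.1 xc.1 xc.2 ≠ xc.2)) <;>
      simp

theorem clsEq_next {g g0 : List (List Char)} (h : ClsEq g g0) : ClsEq (nextA g) g0 := by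
  unfold ClsEq
  rw [← h]
  rw [nextA_eq_map]
  rw [List.map_map]
  have : ∀ yr ∈ PySem.List.enumerate g,
      (List.map clsC ∘ fun yr => (PySem.List.enumerate yr.2).map
        (fun xc => fB (buildA g) yr.1 xc.1 xc.2)) yr = List.map clsC yr.2 := by
    intro yr _
    simp only [Function.comp_apply, List.map_map]
    calc (PySem.List.enumerate yr.2).map
          (clsC ∘ fun xc => fB (buildA g) yr.1 xc.1 xc.2)
        = (PySem.List.enumerate yr.2).map (fun xc => clsC xc.2) :=
          List.map_congr_left (fun xc _ => clsC_fB (buildA g) yr.1 xc.1 xc.2)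
      _ = List.map clsC ((PySem.List.enumerate yr.2).map (fun xc => xc.2)) := by
          rw [List.map_map]; rfl
      _ = List.map clsC yr.2 := by rw [PySem.List.map_snd_enumerate]
  rw [List.map_congr_left this]
  calc (PySem.List.enumerate g).map (fun yr => List.map clsC yr.2)
      = List.map (List.map clsC) ((PySem.List.enumerate g).map (fun yr => yr.2)) := by
        rw [List.map_map]; rfl
    _ = List.map (List.map clsC) g := by rw [PySem.List.map_snd_enumerate]

theorem loop_eq {g0 : List (List Char)} (hrect : RectG g0) :
    ∀ (f : Nat) (g : List (List Char)), ClsEq g g0 →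
      loopA f g = loopB (targetsB g0 (g0.length : Int) (pvW g0)) f g := by
  intro f
  induction f with
  | zero => intro g _; rfl
  | succ f ih =>
    intro g hg
    have hs := step_eq hg hrect
    show (if nextA g = g then g else loopA f (nextA g)) =
      (if (stepB (targetsB g0 (g0.length : Int) (pvW g0)) g).2 then
        loopB (targetsB g0 (g0.length : Int) (pvW g0)) f
          (stepB (targetsB g0 (g0.length : Int) (pvW g0)) g).1
      else (stepB (targetsB g0 (g0.length : Int) (pvW g0)) g).1)
    rw [hs]
    by_cases hn : nextA g = g
    · simp [hn]
    · simp only [ne_eq, hn, not_false_eq_true, decide_true, if_true]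
      exact ih (nextA g) (clsEq_next hg)

theorem pre_rect (s : String) (hp : Pre_compute s) :
    RectG ((PySem.Str.splitlines s).map String.toList) := by
  intro row hrow
  rw [List.mem_map] at hrow
  obtain ⟨line, hline, rfl⟩ := hrow
  have := hp line hline
  rw [PySem.Str.len_eq, PySem.Str.len_eq] at this
  cases hsp : PySem.Str.splitlines s with
  | nil => rw [hsp] at hline; simp at hline
  | cons l0 rest =>
    rw [hsp] at this
    simp only [List.headI_cons] at this
    simp only [pvW, List.map_cons, PySem.List.pyGet?_zero_cons, Option.getD_some]
    exact_mod_cast this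

-- ===== VERDICT (by name: the statement is the Claim_ definition above) =====
theorem compute_spec : Claim_equal_compute := by
  intro s _ hp
  unfold Spec_compute
  have hrect := pre_rect s hp
  show ((loopA (pvLoopFuel ((PySem.Str.splitlines s).map String.toList))
      ((PySem.Str.splitlines s).map String.toList)).map
      (fun row => ((row.count '#' : Nat) : Int))).sum =
    ((loopB (targetsB ((PySem.Str.splitlines s).map String.toList)
        ((((PySem.Str.splitlines s).map String.toList)).length : Int)
        (pvW ((PySem.Str.splitlines s).map String.toList)))
      (pvLoopFuel ((PySem.Str.splitlines s).map String.toList))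
      ((PySem.Str.splitlines s).map String.toList)).map
      (fun row => ((row.count '#' : Nat) : Int))).sum
  rw [loop_eq hrect (pvLoopFuel ((PySem.Str.splitlines s).map String.toList))
      ((PySem.Str.splitlines s).map String.toList) rfl]
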